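-- pv_equiv track=rewrite | github.com/realitystevens/speakprime | backend/utils/analysis.py | detect_filler_words
-- ===== SOURCE A (Python) =====
-- from typing import NamedTuple
--
-- FILLER_WORDS: list[str] = [
--     "um",
--     "uh",
--     "like",
--     "you know",
--     "basically",
--     "literally",
--     "sort of",
--     "kind of",
--     "right",
--     "i mean",
--     "actually",
--     "so yeah",
-- ]
--
-- class FillerWordResult(NamedTuple):
--     word: str
--     count: int
--     positions: list[int]  # character offsets in the text
--
-- def detect_filler_words(text: str) -> list[FillerWordResult]:
--     """
--     Detect filler words in a transcript segment.
--
--     Args: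
--         text: Transcript text from the user.
--
--     Returns:
--         List of FillerWordResult named tuples, one per unique filler word found.
--     """
--     text_lower = text.lower()
--     results: list[FillerWordResult] = []
--
--     for fw in FILLER_WORDS:
--         positions: list[int] = []
--         start = 0
--         while True:
--             idx = text_lower.find(fw, start)
--             if idx == -1:
--                 break
--             positions.append(idx)
--             start = idx + len(fw)
--
--         if positions:
--             results.append(FillerWordResult(
--                 word=fw, count=len(positions), positions=positions))
--
--     return results
-- ===== SOURCE B (Python) =====
-- from typing import NamedTuple
--
-- FILLER_WORDS: list[str] = [
--     "um",
--     "uh",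
--     "like",
--     "you know",
--     "basically",
--     "literally",
--     "sort of",
--     "kind of",
--     "right",
--     "i mean",
--     "actually",
--     "so yeah",
-- ]
--
-- class FillerWordResult(NamedTuple):
--     word: str
--     count: int
--     positions: list[int]
--
-- def detect_filler_words(text: str) -> list[FillerWordResult]:
--     """Single left-to-right scan over the text: at each index, test every filler
--     word with startswith and record the hit in a per-word position index; then
--     emit the non-empty entries in FILLER_WORDS order.  (No filler word overlaps
--     itself, so this records exactly the occurrences the find/skip loop finds.)"""
--     text_lower = text.lower()
--     n = len(text_lower)
--     hits: dict[str, list[int]] = {fw: [] for fw in FILLER_WORDS}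
--     for i in range(n):
--         for fw in FILLER_WORDS:
--             if text_lower.startswith(fw, i):
--                 hits[fw].append(i)
--     return [FillerWordResult(fw, len(p), p)
--             for fw in FILLER_WORDS if (p := hits[fw])]
-- ===== Notes on version B (the rewrite author's own statement) =====
-- stated objective: alternative
-- what changed: Replaces the twelve separate find/skip-by-len(word) scans with one left-to-right pass over the text positions that tests each filler word with startswith and accumulates a word-to-positions dict, then emits non-empty entries in FILLER_WORDS order; equal because no filler word overlaps itself.
import Mathlib
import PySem

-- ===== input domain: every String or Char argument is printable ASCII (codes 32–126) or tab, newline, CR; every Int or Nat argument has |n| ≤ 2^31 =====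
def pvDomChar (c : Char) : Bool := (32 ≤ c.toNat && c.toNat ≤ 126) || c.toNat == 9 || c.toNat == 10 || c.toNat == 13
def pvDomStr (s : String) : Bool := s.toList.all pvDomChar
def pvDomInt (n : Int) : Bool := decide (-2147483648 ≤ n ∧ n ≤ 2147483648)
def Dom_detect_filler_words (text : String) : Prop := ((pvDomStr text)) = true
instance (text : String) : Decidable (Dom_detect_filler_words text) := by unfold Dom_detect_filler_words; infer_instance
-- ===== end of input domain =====

-- B replaces A's twelve find/skip scans by one left-to-right scan building a word→positions dict
-- (objective: alternative decomposition, same asymptotic cost); equal since no filler word overlaps itself.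


def fillerWords : List String :=
  ["um", "uh", "like", "you know", "basically", "literally",
   "sort of", "kind of", "right", "i mean", "actually", "so yeah"]

-- ===== PORT A =====
-- 'while True: idx = text_lower.find(fw, start); …' — PySem.Chars.findFrom is the exact model of
-- str.find(sub, start).  The fuel argument (tl.length + 1 at the call) only makes the recursion
-- structural; each iteration moves start past idx, so it is never exhausted for the nonempty words.
def findLoopA (tl w : List Char) : Nat → Nat → List Int
  | _, 0 => []
  | start, fuel + 1 =>
    let idx := PySem.Chars.findFrom tl w (start : Int)
    if idx = -1 then []
    else idx :: findLoopA tl w (idx.toNat + w.length) fuel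

def detect_filler_words (text : String) : List (String × Int × List Int) :=
  let tl := PySem.Chars.lower text.toList   -- text.lower(), on the list side
  fillerWords.foldl (fun results fw =>
    let positions := findLoopA tl fw.toList 0 (tl.length + 1)
    if positions ≠ [] then results ++ [(fw, (positions.length : Int), positions)]
    else results) []

-- ===== PORT B =====
def detect_filler_words_alt (text : String) : List (String × Int × List Int) :=
  let tl := PySem.Chars.lower text.toList   -- text.lower()
  let n := tl.length
  -- hits = {fw: [] for fw in FILLER_WORDS}
  let init : PySem.Dict String (List Int) :=
    fillerWords.foldl (fun d fw => d.insert fw []) PySem.Dict.empty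
  -- one pass over the positions; text_lower.startswith(fw, i) is exact as a prefix test on drop i (0 ≤ i ≤ n)
  let hits := (List.range n).foldl (fun d i =>
    fillerWords.foldl (fun d fw =>
      if PySem.Chars.startswith (tl.drop i) fw.toList then d.modify fw [] (· ++ [(i : Int)])
      else d) d) init
  -- [FillerWordResult(fw, len(p), p) for fw in FILLER_WORDS if (p := hits[fw])]; every fw is a key of hits
  fillerWords.filterMap (fun fw =>
    let p := hits.getD fw []
    if p ≠ [] then some (fw, (p.length : Int), p) else none)

-- ===== PRECONDITION & SPEC =====
def Spec_detect_filler_words (text : String) (out : List (String × Int × List Int)) : Prop := out = detect_filler_words_alt text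
instance (text : String) (out : List (String × Int × List Int)) : Decidable (Spec_detect_filler_words text out) := by unfold Spec_detect_filler_words; infer_instance

-- ===== CLAIM (what is proved, stated in full; the proofs are below) =====
def Claim_equal_detect_filler_words : Prop := ∀ (text : String), Dom_detect_filler_words text → Spec_detect_filler_words text (detect_filler_words text)

-- ===== LEMMAS AND PROOFS =====

-- abbreviation (proofs only) for B's scan dict
def hitsDict (tl : List Char) : PySem.Dict String (List Int) :=
  (List.range tl.length).foldl (fun d i =>
    fillerWords.foldl (fun d fw =>
      if PySem.Chars.startswith (tl.drop i) fw.toList then d.modify fw [] (· ++ [(i : Int)])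
      else d) d)
    (fillerWords.foldl (fun d fw => d.insert fw []) PySem.Dict.empty)

-- No filler word self-overlaps: no proper nonempty tail of it is one of its prefixes.
lemma fillerWords_no_overlap_bool :
    ∀ fw ∈ fillerWords, (List.range fw.toList.length).all
      (fun d => d == 0 || !((fw.toList.drop d).isPrefixOf fw.toList)) = true := by decide

lemma fillerWords_nodup : fillerWords.Nodup := by decide

lemma fillerWords_ne_nil : ∀ fw ∈ fillerWords, fw.toList ≠ [] := by decide

lemma fillerWords_no_overlap {fw : String} (h : fw ∈ fillerWords) :
    ∀ d, 0 < d → d < fw.toList.length → ¬ (fw.toList.drop d <+: fw.toList) := by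
  intro d hd hlt hpre
  have hall := fillerWords_no_overlap_bool fw h
  rw [List.all_eq_true] at hall
  have := hall d (List.mem_range.mpr hlt)
  simp only [Bool.or_eq_true, beq_iff_eq, Bool.not_eq_true'] at this
  rcases this with h0 | hnp
  · omega
  · exact absurd (List.isPrefixOf_iff_prefix.mpr hpre) (by simp [hnp])

-- two occurrences of a non-self-overlapping word are at least its length apart
lemma sep_of_no_overlap {w tl : List Char}
    (hno : ∀ d, 0 < d → d < w.length → ¬ (w.drop d <+: w))
    {i j : Nat} (hi : w <+: tl.drop i) (hj : w <+: tl.drop j)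
    (hij : i < j) (hjw : j < i + w.length) : False := by
  obtain ⟨r, hr⟩ := hi
  have hdj : tl.drop j = w.drop (j - i) ++ r := by
    have h1 : tl.drop j = (tl.drop i).drop (j - i) := by
      rw [List.drop_drop]; congr 1; omega
    rw [h1, ← hr, List.drop_append_of_le_length (by omega)]
  have hp1 : w.drop (j - i) <+: tl.drop j := by rw [hdj]; exact List.prefix_append _ _
  have hlen : (w.drop (j - i)).length ≤ w.length := by simp
  have : w.drop (j - i) <+: w := List.prefix_of_prefix_length_le hp1 hj hlen
  exact hno (j - i) (by omega) (by omega) this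

-- an occurrence at i ≥ start makes w an infix of tl.drop start
lemma infix_of_prefix_drop {w tl : List Char} {start i : Nat} (hsi : start ≤ i)
    (hp : w <+: tl.drop i) : w <:+: tl.drop start := by
  obtain ⟨b, hb⟩ := hp
  refine ⟨(tl.drop start).take (i - start), b, ?_⟩
  have hdi : tl.drop i = (tl.drop start).drop (i - start) := by
    rw [List.drop_drop]; congr 1; omega
  rw [hdi] at hb
  calc (tl.drop start).take (i - start) ++ w ++ b
      = (tl.drop start).take (i - start) ++ (w ++ b) := by rw [List.append_assoc]
    _ = (tl.drop start).take (i - start) ++ (tl.drop start).drop (i - start) := by rw [hb]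
    _ = tl.drop start := List.take_append_drop _ _

-- splitting a filtered increasing range at the first index satisfying P
lemma filter_range'_split {P Q : Nat → Bool} {idx : Nat} :
    ∀ (l s : Nat), s ≤ idx → idx < s + l → P idx = true →
    (∀ i, s ≤ i → i < idx → P i = false) →
    (∀ i, idx < i → P i = Q i) →
    (∀ i, i ≤ idx → Q i = false) →
    (List.range' s l).filter P = idx :: (List.range' s l).filter Q := by
  intro l
  induction l with
  | zero => intro s h1 h2 _ _ _ _; exfalso; omega
  | succ l ih =>
    intro s hs hlt hP hmin heq hQ
    rw [List.range'_succ, List.filter_cons, List.filter_cons]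
    rcases Nat.lt_or_ge s idx with hcase | hcase
    · rw [hmin s le_rfl hcase, hQ s (by omega)]
      exact ih (s + 1) (by omega) (by omega)
        hP (fun i h1 h2 => hmin i (by omega) h2) heq hQ
    · have hsi : s = idx := by omega
      subst hsi
      rw [hP, hQ s le_rfl]
      simp only [reduceIte]
      congr 1
      refine List.filter_congr (fun i hi => ?_)
      have hge : s + 1 ≤ i := by
        have := (List.mem_range'_1.mp hi).1
        omega
      exact heq i (by omega)

-- A's find/skip loop collects exactly the occurrence positions, in order
lemma findLoopA_eq {tl w : List Char} (hw : w ≠ [])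
    (hno : ∀ d, 0 < d → d < w.length → ¬ (w.drop d <+: w)) :
    ∀ (fuel start : Nat), start ≤ tl.length → tl.length + 1 ≤ fuel + start →
    findLoopA tl w start fuel =
      ((List.range tl.length).filter
        (fun i => decide (start ≤ i) && w.isPrefixOf (tl.drop i))).map (fun i : Nat => (i : Int)) := by
  intro fuel
  induction fuel with
  | zero => intro start h1 h2; exfalso; omega
  | succ fuel ih =>
    intro start hsn hfuel
    rw [findLoopA]
    by_cases hneg : PySem.Chars.findFrom tl w (start : Int) = -1
    · rw [if_pos hneg]
      have hninf := (PySem.Chars.findFrom_natCast_eq_neg_one_iff tl w start hsn).mp hneg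
      have hnil : (List.range tl.length).filter
          (fun i => decide (start ≤ i) && w.isPrefixOf (tl.drop i)) = [] := by
        refine List.filter_eq_nil_iff.mpr (fun i _ hPi => ?_)
        simp only [Bool.and_eq_true, decide_eq_true_eq, List.isPrefixOf_iff_prefix] at hPi
        exact hninf (infix_of_prefix_drop hPi.1 hPi.2)
      rw [hnil, List.map_nil]
    · rw [if_neg hneg]
      obtain ⟨hge, hpre, hmin⟩ := PySem.Chars.findFrom_natCast_spec tl w start hsn hneg
      set idxI := PySem.Chars.findFrom tl w (start : Int) with hidxI
      set m := idxI.toNat with hm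
      have h0 : (0 : Int) ≤ idxI := le_trans (Int.natCast_nonneg start) hge
      have hIcast : idxI = (m : Int) := (Int.toNat_of_nonneg h0).symm
      have hwpos : 0 < w.length := List.length_pos_of_ne_nil hw
      have hmlen : m + w.length ≤ tl.length := by
        have := hpre.length_le
        simp only [List.length_drop] at this
        omega
      have hstartm : start ≤ m := by
        rw [hIcast] at hge
        exact_mod_cast hge
      have hsplit : (List.range tl.length).filter
            (fun i => decide (start ≤ i) && w.isPrefixOf (tl.drop i)) =
          m :: (List.range tl.length).filter
            (fun i => decide (m + w.length ≤ i) && w.isPrefixOf (tl.drop i)) := by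
        rw [List.range_eq_range']
        refine filter_range'_split tl.length 0 (Nat.zero_le m) (by omega) ?_ ?_ ?_ ?_
        · simp only [Bool.and_eq_true, decide_eq_true_eq, List.isPrefixOf_iff_prefix]
          exact ⟨hstartm, hpre⟩
        · intro i _ hilt
          by_cases hsi : start ≤ i
          · by_cases hP : w.isPrefixOf (tl.drop i)
            · exact absurd (List.isPrefixOf_iff_prefix.mp hP) (hmin i hsi hilt)
            · simp [hP]
          · simp [hsi]
        · intro i hmi
          by_cases hiw : i < m + w.length
          · by_cases hP : w.isPrefixOf (tl.drop i)
            · exact (sep_of_no_overlap hno hpre (List.isPrefixOf_iff_prefix.mp hP) hmi hiw).elim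
            · simp [hP]
          · rw [decide_eq_true (by omega : start ≤ i),
                decide_eq_true (by omega : m + w.length ≤ i)]
        · intro i hile
          have : ¬ (m + w.length ≤ i) := by omega
          simp [this]
      rw [hsplit, List.map_cons, hIcast]
      congr 1
      exact ih (m + w.length) hmlen (by omega)

-- the inner per-position loop over the (nodup) word list touches each key at most once
lemma inner_fold_getD (c : String → Bool) (v : Int) :
    ∀ (ws : List String) (d : PySem.Dict String (List Int)) (fw : String), ws.Nodup →
    ((ws.foldl (fun d w => if c w then d.modify w [] (· ++ [v]) else d) d).getD fw []) =
      if fw ∈ ws ∧ c fw then d.getD fw [] ++ [v] else d.getD fw [] := by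
  intro ws
  induction ws with
  | nil => intro d fw _; simp
  | cons w ws ih =>
    intro d fw hnd
    rw [List.nodup_cons] at hnd
    rw [List.foldl_cons, ih _ _ hnd.2]
    by_cases hfw : fw = w
    · subst hfw
      have hns : ¬ (fw ∈ ws ∧ c fw) := fun h => hnd.1 h.1
      rw [if_neg hns]
      by_cases hc : c fw
      · rw [if_pos hc, if_pos ⟨List.mem_cons_self, hc⟩, PySem.Dict.getD_modify, if_pos rfl]
      · rw [if_neg hc, if_neg (fun h => hc h.2)]
    · have hmem : (fw ∈ w :: ws ∧ c fw) ↔ (fw ∈ ws ∧ c fw) := by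
        simp [List.mem_cons, hfw]
      by_cases hc : c w
      · rw [if_pos hc]
        by_cases hm : fw ∈ ws ∧ c fw
        · rw [if_pos hm, if_pos (hmem.symm.mp hm), PySem.Dict.getD_modify, if_neg hfw]
        · rw [if_neg hm, if_neg (fun h => hm (hmem.mp h)), PySem.Dict.getD_modify, if_neg hfw]
      · rw [if_neg hc]
        by_cases hm : fw ∈ ws ∧ c fw
        · rw [if_pos hm, if_pos (hmem.symm.mp hm)]
        · rw [if_neg hm, if_neg (fun h => hm (hmem.mp h))]

-- the whole scan: each word's dict entry is the in-order list of its occurrence positions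
lemma scan_fold_getD (tl : List Char) :
    ∀ (ixs : List Nat) (d : PySem.Dict String (List Int)) (fw : String), fw ∈ fillerWords →
    ((ixs.foldl (fun d i =>
        fillerWords.foldl (fun d w =>
          if PySem.Chars.startswith (tl.drop i) w.toList then d.modify w [] (· ++ [(i : Int)])
          else d) d) d).getD fw []) =
      d.getD fw [] ++
        (ixs.filter (fun i => PySem.Chars.startswith (tl.drop i) fw.toList)).map
          (fun i : Nat => (i : Int)) := by
  intro ixs
  induction ixs with
  | nil => intro d fw _; simp
  | cons i ixs ih =>
    intro d fw hfw
    rw [List.foldl_cons, ih _ _ hfw, List.filter_cons]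
    rw [inner_fold_getD (fun w => PySem.Chars.startswith (tl.drop i) w.toList) (i : Int)
        fillerWords d fw fillerWords_nodup]
    by_cases hc : PySem.Chars.startswith (tl.drop i) fw.toList
    · rw [if_pos ⟨hfw, hc⟩, hc]
      simp [List.append_assoc]
    · rw [if_neg (fun h => hc h.2)]
      simp [hc]

lemma init_getD :
    ∀ fw ∈ fillerWords,
      (fillerWords.foldl (fun d fw => d.insert fw ([] : List Int)) PySem.Dict.empty).getD fw [] = [] := by
  decide

lemma filterMap_ite (p : String → Prop) [DecidablePred p]
    (g : String → String × Int × List Int) :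
    ∀ (l : List String),
      l.filterMap (fun x => if p x then some (g x) else none) =
        (l.filter (fun x => decide (p x))).map g := by
  intro l
  induction l with
  | nil => rfl
  | cons x l ih =>
    rw [List.filterMap_cons, List.filter_cons]
    by_cases h : p x
    · simp [h, ih]
    · simp [h, ih]

-- an 'if p then acc ++ [x] else acc' fold with a propositional guard, as filter-then-map
lemma foldl_append_if_prop (p : String → Prop) [DecidablePred p]
    (f : String → String × Int × List Int) :
    ∀ (l : List String) (acc : List (String × Int × List Int)),
      l.foldl (fun acc x => if p x then acc ++ [f x] else acc) acc =
        acc ++ (l.filter (fun x => decide (p x))).map f := by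
  intro l
  induction l with
  | nil => simp
  | cons x l ih =>
    intro acc
    rw [List.foldl_cons, List.filter_cons]
    by_cases h : p x
    · simp [h, ih, List.append_assoc]
    · simp [h, ih]

-- the two per-word position lists coincide
lemma positions_eq (tl : List Char) {fw : String} (hfw : fw ∈ fillerWords) :
    findLoopA tl fw.toList 0 (tl.length + 1) = (hitsDict tl).getD fw [] := by
  unfold hitsDict
  rw [scan_fold_getD tl (List.range tl.length) _ fw hfw, init_getD fw hfw, List.nil_append]
  rw [findLoopA_eq (fillerWords_ne_nil fw hfw) (fillerWords_no_overlap hfw)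
      (tl.length + 1) 0 (Nat.zero_le _) (by omega)]
  refine congrArg (List.map _) (List.filter_congr fun i _ => ?_)
  simp [PySem.Chars.startswith]

lemma main_eq (tl : List Char) :
    fillerWords.foldl (fun results fw =>
        if findLoopA tl fw.toList 0 (tl.length + 1) ≠ [] then
          results ++ [(fw, ((findLoopA tl fw.toList 0 (tl.length + 1)).length : Int),
                       findLoopA tl fw.toList 0 (tl.length + 1))]
        else results) [] =
      fillerWords.filterMap (fun fw =>
        if (hitsDict tl).getD fw [] ≠ [] then
          some (fw, (((hitsDict tl).getD fw []).length : Int), (hitsDict tl).getD fw [])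
        else none) := by
  rw [foldl_append_if_prop (fun fw => findLoopA tl fw.toList 0 (tl.length + 1) ≠ [])
        (fun fw => (fw, ((findLoopA tl fw.toList 0 (tl.length + 1)).length : Int),
                    findLoopA tl fw.toList 0 (tl.length + 1))) fillerWords [],
      List.nil_append,
      filterMap_ite (fun fw => (hitsDict tl).getD fw [] ≠ [])
        (fun fw => (fw, (((hitsDict tl).getD fw []).length : Int), (hitsDict tl).getD fw []))
        fillerWords]
  rw [List.filter_congr (fun fw hfw => by rw [positions_eq tl hfw] :
        ∀ fw ∈ fillerWords,
          (decide (findLoopA tl fw.toList 0 (tl.length + 1) ≠ []) : Bool) =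
          decide ((hitsDict tl).getD fw [] ≠ []))]
  exact List.map_congr_left (fun fw hfw => by
    rw [positions_eq tl (List.mem_of_mem_filter hfw)])

-- ===== VERDICT (by name: the statement is the Claim_ definition above) =====
theorem detect_filler_words_spec : Claim_equal_detect_filler_words := by
  intro text _
  show detect_filler_words text = detect_filler_words_alt text
  exact main_eq (PySem.Chars.lower text.toList)
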